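-- pv_equiv track=rewrite | github.com/Jayant296/Jayant-DSA | week27/Graphs3/maximum_depth.py | solve
-- ===== SOURCE A (Python) =====
-- def solve(A, B, C, D, E, F):
--     '''
--     the logic we are using here is first we make a dictionary which
--     stores the values of nodes of each level.
--     and then we run a loop of the querries to find ans of each querry efficiently.
--     '''
--     # using dfs here
--     adj_list = {i:[] for i in range(1,A+1)}
--     for i in range(len(B)):
--         adj_list[B[i]].append(C[i])
--         adj_list[C[i]].append(B[i])
--     visited1 = [0 for _ in range(A)]
--     visited2 = [0 for _ in range(A)]
--
--     # dfs for max_depth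
--     def dfs_maxdepth(curr):
--         depth = 0
--         visited1[curr-1] = 1
--         for i in adj_list[curr]:
--             if visited1[i-1]:
--                 continue
--             depth = max(depth, 1 + dfs_maxdepth(i))
--         return depth
--
--     # dfs for filling values in dict
--     max_depth = dfs_maxdepth(1)
--     level_elements = {i:[] for i in range(max_depth+1)}
--     def dfs(node,curr_level):
--         level_elements[curr_level].append(D[node-1])
--         visited2[node-1] = 1
--         for i in adj_list[node]:
--             if not visited2[i-1]:
--                 dfs(i,curr_level+1)
--
--     # bin search
--     def bin_search(L,X): # lower bound
--         arr = level_elements[L]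
--         st, end = 0, len(arr)-1
--         ans = -1
--         while st <= end:
--             mid = (st + end)//2
--             if arr[mid] >= X:
--                 ans = arr[mid]
--                 end = mid -1
--             else:
--                 st = mid + 1
--         return ans
--
--     dfs(1,0)
--     for i in level_elements.values():
--         i.sort()
--
--     ans = []
--     for i in range(len(E)):
--         L = E[i] % (max_depth+1)
--         X = F[i]
--         val = bin_search(L,X)
--         ans.append(val)
--
--     return ans
-- ===== SOURCE B (Python) =====
-- def solve(A, B, C, D, E, F):
--     # One iterative DFS with an explicit stack replaces the two recursive DFS
--     # passes (max depth + level dict); queries answered by a direct min over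
--     # the matching (level, value) pairs instead of sort + hand-rolled binary search.
--     adj = {i: [] for i in range(1, A + 1)}
--     for u, v in zip(B, C):
--         adj[u].append(v)
--         adj[v].append(u)
--     visited = [False] * A
--     pairs = []          # (level, D-value) in visit order
--     max_depth = 0
--     stack = [(1, 0)]
--     while stack:
--         node, lvl = stack.pop()
--         if visited[node - 1]:
--             continue
--         visited[node - 1] = True
--         pairs.append((lvl, D[node - 1]))
--         if lvl > max_depth:
--             max_depth = lvl
--         for nb in reversed(adj[node]):
--             stack.append((nb, lvl + 1))
--     ans = []
--     for e, x in zip(E, F):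
--         lvl = e % (max_depth + 1)
--         ans.append(min((v for l, v in pairs if l == lvl and v >= x), default=-1))
--     return ans
-- ===== Notes on version B (the rewrite author's own statement) =====
-- stated objective: simpler
-- what changed: B replaces A's two recursive DFS passes (one for max depth, one to fill a level->values dict) with a single iterative DFS using an explicit stack that collects (level, value) pairs and the max level in one traversal, and answers each query by a direct minimum over the matching pairs instead of per-level sorting plus a hand-written binary search.
import Mathlib
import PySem

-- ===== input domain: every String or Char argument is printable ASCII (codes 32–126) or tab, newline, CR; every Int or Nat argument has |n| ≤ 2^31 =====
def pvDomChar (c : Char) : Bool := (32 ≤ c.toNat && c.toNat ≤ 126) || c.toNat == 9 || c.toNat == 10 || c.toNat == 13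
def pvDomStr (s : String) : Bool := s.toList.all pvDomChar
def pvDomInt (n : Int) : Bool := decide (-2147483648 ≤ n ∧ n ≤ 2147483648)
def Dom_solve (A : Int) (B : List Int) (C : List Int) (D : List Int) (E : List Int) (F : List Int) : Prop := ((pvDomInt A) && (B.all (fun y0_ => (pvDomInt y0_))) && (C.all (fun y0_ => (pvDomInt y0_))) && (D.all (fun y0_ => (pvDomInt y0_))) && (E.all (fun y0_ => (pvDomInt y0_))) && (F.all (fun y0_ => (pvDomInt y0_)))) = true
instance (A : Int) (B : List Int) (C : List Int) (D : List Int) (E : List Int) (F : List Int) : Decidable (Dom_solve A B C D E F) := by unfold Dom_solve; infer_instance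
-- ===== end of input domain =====

-- B replaces A's two recursive DFS passes by one explicit-stack DFS and answers each
-- query by a direct minimum over the matching (level, value) pairs instead of
-- per-level sort + hand-written binary search (objective: simpler).

-- ===== PORT A =====

-- shared by both ports (both Pythons build the adjacency dict identically)
def buildAdj (A : Int) (B C : List Int) : PySem.Dict Int (List Int) :=
  let d0 := (PySem.List.pyRange 1 (A+1) 1).foldl
      (fun d i => d.insert i ([] : List Int)) PySem.Dict.empty
  (B.zip C).foldl
      (fun d uv => (d.modify uv.1 [] (· ++ [uv.2])).modify uv.2 [] (· ++ [uv.1])) d0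

-- dfs_maxdepth; fuel is a totality guard only (recursion depth ≤ #nodes + 1)
def dfsMax (adj : PySem.Dict Int (List Int)) : Nat → Int → List Int → Int × List Int
  | 0, _, vis => (0, vis)
  | fuel+1, curr, vis =>
    (adj.getD curr []).foldl
      (fun acc i =>
        if PySem.List.pyGetD acc.2 (i-1) 0 ≠ 0 then acc
        else
          let r := dfsMax adj fuel i acc.2
          (max acc.1 (1 + r.1), r.2))
      (0, PySem.List.pySetD vis (curr-1) 1)

-- dfs filling level_elements; state = (level_elements, visited2)
def dfsFill (adj : PySem.Dict Int (List Int)) (Dv : List Int) :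
    Nat → Int → Int → PySem.Dict Int (List Int) × List Int → PySem.Dict Int (List Int) × List Int
  | 0, _, _, s => s
  | fuel+1, node, lvl, s =>
    let lv := s.1.modify lvl [] (· ++ [PySem.List.pyGetD Dv (node-1) 0])
    let vis := PySem.List.pySetD s.2 (node-1) 1
    (adj.getD node []).foldl
      (fun t i => if PySem.List.pyGetD t.2 (i-1) 0 ≠ 0 then t else dfsFill adj Dv fuel i (lvl+1) t)
      (lv, vis)

-- the hand-written lower-bound binary search; fuel is a totality guard only
def binSearchGo (arr : List Int) (X : Int) : Nat → Int → Int → Int → Int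
  | 0, _, _, ans => ans
  | fuel+1, st, en, ans =>
    if st ≤ en then
      let mid := PySem.Int.floordiv (st + en) 2
      if PySem.List.pyGetD arr mid 0 ≥ X then binSearchGo arr X fuel st (mid-1) (PySem.List.pyGetD arr mid 0)
      else binSearchGo arr X fuel (mid+1) en ans
    else ans

def solve (A : Int) (B : List Int) (C : List Int) (D : List Int) (E : List Int) (F : List Int) : List Int :=
  let adj := buildAdj A B C
  let visited1 : List Int := List.replicate A.toNat 0
  let visited2 : List Int := List.replicate A.toNat 0
  let maxDepth := (dfsMax adj (A.toNat+1) 1 visited1).1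
  let lv0 := (PySem.List.pyRange 0 (maxDepth+1) 1).foldl
      (fun d i => d.insert i ([] : List Int)) PySem.Dict.empty
  let lv := (dfsFill adj D (A.toNat+1) 1 0 (lv0, visited2)).1
  let lvS := PySem.Dict.mk (lv.items.map (fun p => (p.1, PySem.List.sorted p.2 (fun v => v))))
  (E.zip F).foldl (fun ans q =>
      let L := PySem.Int.mod q.1 (maxDepth+1)
      let arr := lvS.getD L []
      ans ++ [binSearchGo arr q.2 (arr.length+1) 0 ((arr.length : Int) - 1) (-1)]) []

-- ===== PORT B =====

-- the explicit-stack DFS of Source B; fuel is a totality guard only (consumed on marking pops)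
def stackGo (adj : PySem.Dict Int (List Int)) (Dv : List Int) :
    Nat → List (Int × Int) → List Int → List (Int × Int) → Int → List (Int × Int) × Int
  | _, [], _, pairs, maxd => (pairs, maxd)
  | fuel, (node, lvl) :: rest, vis, pairs, maxd =>
    if PySem.List.pyGetD vis (node-1) 0 ≠ 0 then stackGo adj Dv fuel rest vis pairs maxd
    else
      match fuel with
      | 0 => (pairs, maxd)
      | fuel'+1 =>
        stackGo adj Dv fuel'
          (((adj.getD node []).reverse).foldl (fun s nb => (nb, lvl+1) :: s) rest)
          (PySem.List.pySetD vis (node-1) 1)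
          (pairs ++ [(lvl, PySem.List.pyGetD Dv (node-1) 0)])
          (if lvl > maxd then lvl else maxd)
  termination_by fuel stack => (fuel, stack.length)

def solve_alt (A : Int) (B : List Int) (C : List Int) (D : List Int) (E : List Int) (F : List Int) : List Int :=
  let adj := buildAdj A B C
  let r := stackGo adj D (A.toNat + 1) [(1, 0)] (List.replicate A.toNat 0) [] 0
  (E.zip F).foldl (fun ans q =>
      let lvl := PySem.Int.mod q.1 (r.2 + 1)
      ans ++ [PySem.List.minD ((r.1.filter (fun p => p.1 == lvl && q.2 ≤ p.2)).map (·.2)) (fun v => v) (-1)]) []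

-- ===== PRECONDITION & SPEC =====
-- one closure step of the node set `acc` under the (undirected) edge list
def reachStep (edges : List (Int × Int)) (acc : List Int) : List Int :=
  edges.foldl (fun acc e =>
    let acc1 := if e.1 ∈ acc ∧ e.2 ∉ acc then acc ++ [e.2] else acc
    if e.2 ∈ acc1 ∧ e.1 ∉ acc1 then acc1 ++ [e.1] else acc1) acc

-- Pre_solve: exactly the inputs on which A returns normally: node count ≥ 1, every used
-- edge endpoint a valid node, C and F at least as long as B and E (A indexes C[i] for
-- i < len(B) and F[i] for i < len(E)), and D holding an entry for every node reachable
-- from node 1 (the nodes A's DFS visits and indexes D at); reachability is stated as the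
-- A-fold closure of {1} under the edge relation, which is its exact fixpoint.
def Pre_solve (A : Int) (B : List Int) (C : List Int) (D : List Int) (E : List Int) (F : List Int) : Prop :=
  1 ≤ A ∧ B.length ≤ C.length ∧ E.length ≤ F.length ∧
  (∀ x ∈ B, 1 ≤ x ∧ x ≤ A) ∧ (∀ x ∈ C.take B.length, 1 ≤ x ∧ x ≤ A) ∧
  (∀ n ∈ (reachStep (B.zip C))^[A.toNat] [1], n ≤ (D.length : Int))
instance (A : Int) (B : List Int) (C : List Int) (D : List Int) (E : List Int) (F : List Int) : Decidable (Pre_solve A B C D E F) := by unfold Pre_solve; infer_instance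

def pvWitness_solve : Int × List Int × List Int × List Int × List Int × List Int :=
  (4, [1, 2, 1], [2, 3, 4], [10, 5, 7, 3], [1, 2, 0], [4, 6, 11])

def Spec_solve (A : Int) (B : List Int) (C : List Int) (D : List Int) (E : List Int) (F : List Int) (out : List Int) : Prop := out = solve_alt A B C D E F
instance (A : Int) (B : List Int) (C : List Int) (D : List Int) (E : List Int) (F : List Int) (out : List Int) : Decidable (Spec_solve A B C D E F out) := by unfold Spec_solve; infer_instance

-- ===== CLAIM (what is proved, stated in full; the proofs are below) =====
def Claim_equal_solve : Prop := ∀ (A : Int) (B : List Int) (C : List Int) (D : List Int) (E : List Int) (F : List Int), Dom_solve A B C D E F → Pre_solve A B C D E F → Spec_solve A B C D E F (solve A B C D E F)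

-- ===== LEMMAS AND PROOFS =====

-- ---------- proof-side reference: the DFS visit sequence (node, level) ----------

def adjGood (adj : PySem.Dict Int (List Int)) (A : Int) : Prop :=
  ∀ n : Int, ∀ x ∈ adj.getD n [], 1 ≤ x ∧ x ≤ A

def visitSeq (adj : PySem.Dict Int (List Int)) : Nat → Int → Int → List Int → List (Int × Int) × List Int
  | 0, _, _, vis => ([], vis)
  | f+1, node, lvl, vis =>
    let r := (adj.getD node []).foldl
      (fun acc i =>
        if PySem.List.pyGetD acc.2 (i-1) 0 ≠ 0 then acc
        else
          let s := visitSeq adj f i (lvl+1) acc.2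
          (acc.1 ++ s.1, s.2))
      (([] : List (Int × Int)), PySem.List.pySetD vis (node-1) 1)
    ((node, lvl) :: r.1, r.2)

-- what the explicit stack computes, expressed over visitSeq (canonical fuel vis.length+1)
def runSpec (adj : PySem.Dict Int (List Int)) (Dv : List Int) :
    List (Int × Int) → List Int → List (Int × Int) → Int → List (Int × Int) × Int
  | [], _, pairs, maxd => (pairs, maxd)
  | (n, l) :: rest, vis, pairs, maxd =>
    if PySem.List.pyGetD vis (n-1) 0 ≠ 0 then runSpec adj Dv rest vis pairs maxd
    else
      let r := visitSeq adj (vis.length + 1) n l vis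
      runSpec adj Dv rest r.2
        (pairs ++ r.1.map (fun p => (p.2, PySem.List.pyGetD Dv (p.1-1) 0)))
        (r.1.foldl (fun m p => if p.2 > m then p.2 else m) maxd)

-- ---------- small utilities ----------

theorem push_reverse {α β : Type} (l : List α) (f : α → β) (rest : List β) :
    (l.reverse).foldl (fun s x => f x :: s) rest = l.map f ++ rest := by
  induction l generalizing rest with
  | nil => simp
  | cons a t ih => simp [List.foldl_append, ih]

theorem count_set_zero (vis : List Int) (k : Nat) (hk : k < vis.length) (h0 : vis[k] = 0) :
    (vis.set k 1).count 0 + 1 = vis.count 0 := by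
  rw [List.count_set hk]
  have hmem : (0 : Int) ∈ vis := by
    exact h0 ▸ List.getElem_mem hk
  have : 1 ≤ vis.count 0 := List.one_le_count_iff.mpr hmem
  simp [h0]; omega

theorem count_set_le (vis : List Int) (k : Nat) :
    (vis.set k (1:Int)).count 0 ≤ vis.count 0 := by
  by_cases hk : k < vis.length
  · rw [List.count_set hk]; split <;> simp
  · rw [List.set_eq_of_length_le (by omega)]

theorem zero_mem_of_pyGetD (vis : List Int) (n : Int) (h1 : 1 ≤ n) (h2 : n ≤ (vis.length : Int))
    (h0 : PySem.List.pyGetD vis (n-1) 0 = 0) : vis[(n-1).toNat]'(by omega) = 0 := by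
  rw [PySem.List.pyGetD_eq_getElem vis 0 (by omega) (by omega)] at h0
  exact h0

-- ---------- visitSeq: monotonicity of the visited list ----------

theorem vs_mono (adj : PySem.Dict Int (List Int)) :
    ∀ (f : Nat) (n l : Int) (vis : List Int),
      (visitSeq adj f n l vis).2.length = vis.length ∧
      (visitSeq adj f n l vis).2.count 0 ≤ vis.count 0 := by
  intro f
  induction f with
  | zero => intro n l vis; simp [visitSeq]
  | succ f ih =>
    intro n l vis
    have fold : ∀ (cs : List Int) (acc : List (Int × Int) × List Int),
        acc.2.length = vis.length → acc.2.count 0 ≤ vis.count 0 →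
        (cs.foldl
          (fun acc i =>
            if PySem.List.pyGetD acc.2 (i-1) 0 ≠ 0 then acc
            else
              let s := visitSeq adj f i (l+1) acc.2
              (acc.1 ++ s.1, s.2)) acc).2.length = vis.length ∧
        (cs.foldl
          (fun acc i =>
            if PySem.List.pyGetD acc.2 (i-1) 0 ≠ 0 then acc
            else
              let s := visitSeq adj f i (l+1) acc.2
              (acc.1 ++ s.1, s.2)) acc).2.count 0 ≤ vis.count 0 := by
      intro cs
      induction cs with
      | nil => intro acc h1 h2; exact ⟨h1, h2⟩
      | cons c cs ihc =>
        intro acc h1 h2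
        simp only [List.foldl_cons]
        by_cases hg : PySem.List.pyGetD acc.2 (c-1) 0 ≠ 0
        · rw [if_pos hg]; exact ihc acc h1 h2
        · rw [if_neg hg]
          refine ihc _ ?_ ?_
          · exact (ih c (l+1) acc.2).1.trans h1
          · exact (ih c (l+1) acc.2).2.trans h2
    have hset : (PySem.List.pySetD vis (n-1) 1).length = vis.length ∧
        (PySem.List.pySetD vis (n-1) 1).count 0 ≤ vis.count 0 := by
      refine ⟨PySem.List.length_pySetD vis (n-1) 1, ?_⟩
      unfold PySem.List.pySetD PySem.List.pySet? PySem.List.pyIdx?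
      split_ifs <;> simp <;> apply count_set_le
    simp only [visitSeq]
    exact fold _ _ hset.1 hset.2



theorem solve_witness_pre : Dom_solve (pvWitness_solve.1) (pvWitness_solve.2.1) (pvWitness_solve.2.2.1) (pvWitness_solve.2.2.2.1) (pvWitness_solve.2.2.2.2.1) (pvWitness_solve.2.2.2.2.2) ∧ Pre_solve (pvWitness_solve.1) (pvWitness_solve.2.1) (pvWitness_solve.2.2.1) (pvWitness_solve.2.2.2.1) (pvWitness_solve.2.2.2.2.1) (pvWitness_solve.2.2.2.2.2) := by
  constructor <;> decide


-- ---------- visitSeq: fuel irrelevance above the zero count ----------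

theorem vs_irrel (adj : PySem.Dict Int (List Int)) (A : Int) (hg : adjGood adj A) :
    ∀ (k : Nat) (vis : List Int), vis.count 0 ≤ k →
    ∀ (n l : Int) (f₁ f₂ : Nat),
      vis.length = A.toNat → 1 ≤ n → n ≤ A →
      PySem.List.pyGetD vis (n-1) 0 = 0 →
      vis.count 0 < f₁ → vis.count 0 < f₂ →
      visitSeq adj f₁ n l vis = visitSeq adj f₂ n l vis := by
  intro k
  induction k using Nat.strong_induction_on with
  | _ k ih =>
    intro vis hk n l f₁ f₂ hlen hn1 hnA h0 hf₁ hf₂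
    obtain ⟨a, rfl⟩ : ∃ a, f₁ = a + 1 := ⟨f₁-1, by omega⟩
    obtain ⟨b, rfl⟩ : ∃ b, f₂ = b + 1 := ⟨f₂-1, by omega⟩
    have hlenA : n ≤ (vis.length : Int) := by omega
    have hidx : (n-1).toNat < vis.length := by omega
    have hzero := zero_mem_of_pyGetD vis n hn1 hlenA h0
    have hc1 : (PySem.List.pySetD vis (n-1) 1).count 0 + 1 = vis.count 0 := by
      rw [PySem.List.pySetD_of_nonneg vis 1 (by omega)]
      exact count_set_zero vis _ hidx hzero
    have hl1 : (PySem.List.pySetD vis (n-1) 1).length = vis.length :=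
      PySem.List.length_pySetD _ _ _
    have fold : ∀ (cs : List Int), (∀ c ∈ cs, 1 ≤ c ∧ c ≤ A) →
        ∀ (acc : List (Int × Int) × List Int),
        acc.2.length = A.toNat → acc.2.count 0 < vis.count 0 →
        cs.foldl (fun acc i =>
            if PySem.List.pyGetD acc.2 (i-1) 0 ≠ 0 then acc
            else
              let s := visitSeq adj a i (l+1) acc.2
              (acc.1 ++ s.1, s.2)) acc
        = cs.foldl (fun acc i =>
            if PySem.List.pyGetD acc.2 (i-1) 0 ≠ 0 then acc
            else
              let s := visitSeq adj b i (l+1) acc.2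
              (acc.1 ++ s.1, s.2)) acc := by
      intro cs
      induction cs with
      | nil => intro _ acc _ _; rfl
      | cons c cs ihc =>
        intro hcs acc hal hac
        simp only [List.foldl_cons]
        by_cases hgd : PySem.List.pyGetD acc.2 (c-1) 0 ≠ 0
        · rw [if_pos hgd, if_pos hgd]
          exact ihc (fun x hx => hcs x (List.mem_cons_of_mem _ hx)) acc hal hac
        · rw [if_neg hgd, if_neg hgd]
          rw [not_not] at hgd
          obtain ⟨hc1', hcA'⟩ := hcs c (List.mem_cons_self ..)
          have heq : visitSeq adj a c (l+1) acc.2 = visitSeq adj b c (l+1) acc.2 :=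
            ih (acc.2.count 0) (by omega) acc.2 le_rfl c (l+1) a b hal hc1' hcA' hgd
              (by omega) (by omega)
          simp only [heq]
          exact ihc (fun x hx => hcs x (List.mem_cons_of_mem _ hx)) _
            (by rw [(vs_mono adj b c (l+1) acc.2).1]; exact hal)
            (lt_of_le_of_lt (vs_mono adj b c (l+1) acc.2).2 hac)
    simp only [visitSeq]
    rw [fold (adj.getD n []) (fun c hc => hg n c hc) ([], PySem.List.pySetD vis (n-1) 1)
      (by rw [hl1]; exact hlen)
      (by show (PySem.List.pySetD vis (n-1) 1).count 0 < vis.count 0; omega)]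


-- ---------- the visitSeq fold: extracting the sequence accumulator ----------

theorem fold_acc (adj : PySem.Dict Int (List Int)) (f : Nat) (l : Int) :
    ∀ (cs : List Int) (a : List (Int × Int)) (w : List Int),
      cs.foldl (fun acc i =>
          if PySem.List.pyGetD acc.2 (i-1) 0 ≠ 0 then acc
          else
            let s := visitSeq adj f i (l+1) acc.2
            (acc.1 ++ s.1, s.2)) (a, w)
      = (a ++ (cs.foldl (fun acc i =>
          if PySem.List.pyGetD acc.2 (i-1) 0 ≠ 0 then acc
          else
            let s := visitSeq adj f i (l+1) acc.2
            (acc.1 ++ s.1, s.2)) ([], w)).1,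
         (cs.foldl (fun acc i =>
          if PySem.List.pyGetD acc.2 (i-1) 0 ≠ 0 then acc
          else
            let s := visitSeq adj f i (l+1) acc.2
            (acc.1 ++ s.1, s.2)) ([], w)).2) := by
  intro cs
  induction cs with
  | nil => intro a w; simp
  | cons c cs ihc =>
    intro a w
    simp only [List.foldl_cons]
    by_cases hgd : PySem.List.pyGetD w (c-1) 0 ≠ 0
    · rw [if_pos hgd, if_pos hgd]
      exact ihc a w
    · rw [if_neg hgd, if_neg hgd]
      rw [ihc (a ++ (visitSeq adj f c (l+1) w).1) ((visitSeq adj f c (l+1) w).2),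
          ihc ([] ++ (visitSeq adj f c (l+1) w).1) ((visitSeq adj f c (l+1) w).2)]
      simp

-- ---------- stack processing of pushed children = the visitSeq fold ----------

theorem runSpec_sub (adj : PySem.Dict Int (List Int)) (A : Int) (Dv : List Int)
    (hg : adjGood adj A) (l : Int) (rest : List (Int × Int)) :
    ∀ (cs : List Int), (∀ c ∈ cs, 1 ≤ c ∧ c ≤ A) →
    ∀ (w : List Int) (pairs : List (Int × Int)) (maxd : Int),
      w.length = A.toNat → w.count 0 < A.toNat →
      runSpec adj Dv (cs.map (fun nb => (nb, l+1)) ++ rest) w pairs maxd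
        = runSpec adj Dv rest
            (cs.foldl (fun acc i =>
                if PySem.List.pyGetD acc.2 (i-1) 0 ≠ 0 then acc
                else
                  let s := visitSeq adj A.toNat i (l+1) acc.2
                  (acc.1 ++ s.1, s.2)) ([], w)).2
            (pairs ++ (cs.foldl (fun acc i =>
                if PySem.List.pyGetD acc.2 (i-1) 0 ≠ 0 then acc
                else
                  let s := visitSeq adj A.toNat i (l+1) acc.2
                  (acc.1 ++ s.1, s.2)) ([], w)).1.map
                (fun p => (p.2, PySem.List.pyGetD Dv (p.1-1) 0)))
            ((cs.foldl (fun acc i =>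
                if PySem.List.pyGetD acc.2 (i-1) 0 ≠ 0 then acc
                else
                  let s := visitSeq adj A.toNat i (l+1) acc.2
                  (acc.1 ++ s.1, s.2)) ([], w)).1.foldl
                (fun m p => if p.2 > m then p.2 else m) maxd) := by
  intro cs
  induction cs with
  | nil => intro _ w pairs maxd _ _; simp
  | cons c cs ihc =>
    intro hcs w pairs maxd hwl hwc
    simp only [List.map_cons, List.cons_append, List.foldl_cons]
    obtain ⟨hc1, hcA⟩ := hcs c (List.mem_cons_self ..)
    by_cases hgd : PySem.List.pyGetD w (c-1) 0 ≠ 0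
    · rw [show runSpec adj Dv ((c, l+1) :: (cs.map (fun nb => (nb, l+1)) ++ rest)) w pairs maxd
            = runSpec adj Dv (cs.map (fun nb => (nb, l+1)) ++ rest) w pairs maxd by
          simp only [runSpec]; rw [if_pos hgd]]
      rw [if_pos hgd]
      exact ihc (fun x hx => hcs x (List.mem_cons_of_mem _ hx)) w pairs maxd hwl hwc
    · have hgd0 : PySem.List.pyGetD w (c-1) 0 = 0 := not_not.mp hgd
      have hirr : visitSeq adj (w.length + 1) c (l+1) w = visitSeq adj A.toNat c (l+1) w :=
        vs_irrel adj A hg (w.count 0) w le_rfl c (l+1) (w.length + 1) A.toNat hwl hc1 hcA hgd0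
          (by have := List.count_le_length (l := w) (a := (0:Int)); omega) hwc
      rw [show runSpec adj Dv ((c, l+1) :: (cs.map (fun nb => (nb, l+1)) ++ rest)) w pairs maxd
            = runSpec adj Dv (cs.map (fun nb => (nb, l+1)) ++ rest)
                (visitSeq adj A.toNat c (l+1) w).2
                (pairs ++ (visitSeq adj A.toNat c (l+1) w).1.map
                  (fun p => (p.2, PySem.List.pyGetD Dv (p.1-1) 0)))
                ((visitSeq adj A.toNat c (l+1) w).1.foldl
                  (fun m p => if p.2 > m then p.2 else m) maxd) by
          simp only [runSpec]; rw [if_neg hgd]; rw [hirr]]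
      rw [if_neg hgd]
      rw [ihc (fun x hx => hcs x (List.mem_cons_of_mem _ hx)) _ _ _
            (by rw [(vs_mono adj A.toNat c (l+1) w).1]; exact hwl)
            (lt_of_le_of_lt (vs_mono adj A.toNat c (l+1) w).2 hwc)]
      rw [fold_acc adj A.toNat l cs ([] ++ (visitSeq adj A.toNat c (l+1) w).1)
            ((visitSeq adj A.toNat c (l+1) w).2)]
      simp

-- ---------- unfolding one marking step of runSpec ----------

theorem runSpec_unfold (adj : PySem.Dict Int (List Int)) (A : Int) (Dv : List Int)
    (hg : adjGood adj A) (vis : List Int) (n l : Int) (rest pairs : List (Int × Int)) (maxd : Int)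
    (hlen : vis.length = A.toNat) (hn1 : 1 ≤ n) (hnA : n ≤ A)
    (h0 : PySem.List.pyGetD vis (n-1) 0 = 0) :
    runSpec adj Dv ((n, l) :: rest) vis pairs maxd
      = runSpec adj Dv ((adj.getD n []).map (fun nb => (nb, l+1)) ++ rest)
          (PySem.List.pySetD vis (n-1) 1)
          (pairs ++ [(l, PySem.List.pyGetD Dv (n-1) 0)])
          (if l > maxd then l else maxd) := by
  have hidx : (n-1).toNat < vis.length := by omega
  have hzero := zero_mem_of_pyGetD vis n hn1 (by omega) h0
  have hc1 : (PySem.List.pySetD vis (n-1) 1).count 0 + 1 = vis.count 0 := by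
    rw [PySem.List.pySetD_of_nonneg vis 1 (by omega)]
    exact count_set_zero vis _ hidx hzero
  have hl1 : (PySem.List.pySetD vis (n-1) 1).length = vis.length :=
    PySem.List.length_pySetD _ _ _
  have hcnt : vis.count 0 ≤ vis.length := List.count_le_length
  conv_lhs => simp only [runSpec]
  rw [if_neg (by rw [h0]; exact not_not.mpr rfl)]
  simp only [visitSeq]
  rw [runSpec_sub adj A Dv hg l rest (adj.getD n []) (fun c hc => hg n c hc)
        (PySem.List.pySetD vis (n-1) 1) (pairs ++ [(l, PySem.List.pyGetD Dv (n-1) 0)])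
        (if l > maxd then l else maxd) (by rw [hl1]; exact hlen) (by omega)]
  rw [show vis.length = A.toNat from hlen]
  rw [fold_acc]
  simp

-- ---------- the explicit stack loop computes runSpec ----------

theorem bridge (adj : PySem.Dict Int (List Int)) (A : Int) (Dv : List Int) (hg : adjGood adj A) :
    ∀ (k : Nat) (vis : List Int), vis.count 0 ≤ k →
    ∀ (stack : List (Int × Int)), (∀ p ∈ stack, 1 ≤ p.1 ∧ p.1 ≤ A) →
    vis.length = A.toNat →
    ∀ (pairs : List (Int × Int)) (maxd : Int) (fuel : Nat), vis.count 0 < fuel →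
      stackGo adj Dv fuel stack vis pairs maxd = runSpec adj Dv stack vis pairs maxd := by
  intro k
  induction k using Nat.strong_induction_on with
  | _ k ih =>
    intro vis hk stack
    induction stack with
    | nil => intro _ _ pairs maxd fuel _; simp [stackGo, runSpec]
    | cons hd rest ihs =>
      obtain ⟨n, l⟩ := hd
      intro hstk hlen pairs maxd fuel hfuel
      obtain ⟨hn1, hnA⟩ := hstk (n, l) (List.mem_cons_self ..)
      by_cases hgd : PySem.List.pyGetD vis (n-1) 0 ≠ 0
      · rw [show stackGo adj Dv fuel ((n, l) :: rest) vis pairs maxd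
              = stackGo adj Dv fuel rest vis pairs maxd by
            rw [stackGo.eq_def]; simp only; rw [if_pos hgd]]
        rw [show runSpec adj Dv ((n, l) :: rest) vis pairs maxd
              = runSpec adj Dv rest vis pairs maxd by
            simp only [runSpec]; rw [if_pos hgd]]
        exact ihs (fun p hp => hstk p (List.mem_cons_of_mem _ hp)) hlen pairs maxd fuel hfuel
      · have hgd0 : PySem.List.pyGetD vis (n-1) 0 = 0 := not_not.mp hgd
        have hidx : (n-1).toNat < vis.length := by omega
        have hzero := zero_mem_of_pyGetD vis n hn1 (by omega) hgd0
        have hc1 : (PySem.List.pySetD vis (n-1) 1).count 0 + 1 = vis.count 0 := by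
          rw [PySem.List.pySetD_of_nonneg vis 1 (by omega)]
          exact count_set_zero vis _ hidx hzero
        obtain ⟨f', rfl⟩ : ∃ f', fuel = f' + 1 := ⟨fuel - 1, by omega⟩
        rw [show stackGo adj Dv (f' + 1) ((n, l) :: rest) vis pairs maxd
              = stackGo adj Dv f'
                  (((adj.getD n []).reverse).foldl (fun s nb => (nb, l+1) :: s) rest)
                  (PySem.List.pySetD vis (n-1) 1)
                  (pairs ++ [(l, PySem.List.pyGetD Dv (n-1) 0)])
                  (if l > maxd then l else maxd) by
            rw [stackGo.eq_def]; simp only; rw [if_neg hgd]]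
        rw [push_reverse]
        rw [ih ((PySem.List.pySetD vis (n-1) 1).count 0) (by omega) _ le_rfl _
              (by
                intro p hp
                rcases List.mem_append.mp hp with hp | hp
                · obtain ⟨nb, hnb, rfl⟩ := List.mem_map.mp hp
                  exact hg n nb hnb
                · exact hstk p (List.mem_cons_of_mem _ hp))
              (by rw [PySem.List.length_pySetD]; exact hlen) _ _ f' (by omega)]
        exact (runSpec_unfold adj A Dv hg vis n l rest pairs maxd hlen hn1 hnA hgd0).symm


-- ---------- max-fold algebra over (node, level) sequences ----------

theorem maxfold_init (t : List (Int × Int)) (l : Int) :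
    ∀ (x y : Int), t.foldl (fun m p => max m (p.2 - l)) (max x y)
      = max x (t.foldl (fun m p => max m (p.2 - l)) y) := by
  induction t with
  | nil => intro x y; rfl
  | cons p t ih =>
    intro x y
    simp only [List.foldl_cons]
    rw [max_assoc, ih]

theorem maxfold_shift (t : List (Int × Int)) (l : Int) :
    ∀ (m : Int), t.foldl (fun m p => max m (p.2 - l)) (m+1)
      = t.foldl (fun m p => max m (p.2 - (l+1))) m + 1 := by
  induction t with
  | nil => intro m; rfl
  | cons p t ih =>
    intro m
    simp only [List.foldl_cons]
    rw [show max (m+1) (p.2 - l) = max m (p.2 - (l+1)) + 1 by omega, ih]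

-- ---------- dfs_maxdepth over the visit sequence ----------

theorem dfsMax_eq (adj : PySem.Dict Int (List Int)) (A : Int) (hg : adjGood adj A) :
    ∀ (k : Nat) (vis : List Int), vis.count 0 ≤ k →
    ∀ (n l : Int) (f : Nat),
      vis.length = A.toNat → 1 ≤ n → n ≤ A →
      PySem.List.pyGetD vis (n-1) 0 = 0 → vis.count 0 < f →
      dfsMax adj f n vis
        = ((visitSeq adj f n l vis).1.foldl (fun m p => max m (p.2 - l)) 0,
           (visitSeq adj f n l vis).2) := by
  intro k
  induction k using Nat.strong_induction_on with
  | _ k ih =>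
    intro vis hk n l f hlen hn1 hnA h0 hf
    obtain ⟨a, rfl⟩ : ∃ a, f = a + 1 := ⟨f-1, by omega⟩
    have hidx : (n-1).toNat < vis.length := by omega
    have hzero := zero_mem_of_pyGetD vis n hn1 (by omega) h0
    have hc1 : (PySem.List.pySetD vis (n-1) 1).count 0 + 1 = vis.count 0 := by
      rw [PySem.List.pySetD_of_nonneg vis 1 (by omega)]
      exact count_set_zero vis _ hidx hzero
    have hl1 : (PySem.List.pySetD vis (n-1) 1).length = vis.length :=
      PySem.List.length_pySetD _ _ _
    have fold : ∀ (cs : List Int), (∀ c ∈ cs, 1 ≤ c ∧ c ≤ A) →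
        ∀ (sq : List (Int × Int)) (w : List Int),
        w.length = A.toNat → w.count 0 < vis.count 0 →
        cs.foldl (fun acc i =>
            if PySem.List.pyGetD acc.2 (i-1) 0 ≠ 0 then acc
            else
              let r := dfsMax adj a i acc.2
              (max acc.1 (1 + r.1), r.2)) (sq.foldl (fun m p => max m (p.2 - l)) 0, w)
        = ((cs.foldl (fun acc i =>
            if PySem.List.pyGetD acc.2 (i-1) 0 ≠ 0 then acc
            else
              let s := visitSeq adj a i (l+1) acc.2
              (acc.1 ++ s.1, s.2)) (sq, w)).1.foldl (fun m p => max m (p.2 - l)) 0,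
           (cs.foldl (fun acc i =>
            if PySem.List.pyGetD acc.2 (i-1) 0 ≠ 0 then acc
            else
              let s := visitSeq adj a i (l+1) acc.2
              (acc.1 ++ s.1, s.2)) (sq, w)).2) := by
      intro cs
      induction cs with
      | nil => intro _ sq w _ _; rfl
      | cons c cs ihc =>
        intro hcs sq w hwl hwc
        simp only [List.foldl_cons]
        by_cases hgd : PySem.List.pyGetD w (c-1) 0 ≠ 0
        · rw [if_pos hgd, if_pos hgd]
          exact ihc (fun x hx => hcs x (List.mem_cons_of_mem _ hx)) sq w hwl hwc
        · rw [if_neg hgd, if_neg hgd]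
          have hgd0 : PySem.List.pyGetD w (c-1) 0 = 0 := not_not.mp hgd
          obtain ⟨hc1', hcA'⟩ := hcs c (List.mem_cons_self ..)
          have hrec := ih (w.count 0) (by omega) w le_rfl c (l+1) a hwl hc1' hcA' hgd0 (by omega)
          simp only [hrec]
          obtain ⟨a', ha⟩ : ∃ a', a = a' + 1 := ⟨a-1, by omega⟩
          have hsc : ∃ tail, (visitSeq adj a c (l+1) w).1 = (c, l+1) :: tail := by
            subst ha; exact ⟨_, rfl⟩
          obtain ⟨tail, htail⟩ := hsc
          have hmax : max (sq.foldl (fun m p => max m (p.2 - l)) 0)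
                (1 + ((visitSeq adj a c (l+1) w).1.foldl (fun m p => max m (p.2 - (l+1))) 0))
              = (sq ++ (visitSeq adj a c (l+1) w).1).foldl (fun m p => max m (p.2 - l)) 0 := by
            rw [List.foldl_append, htail]
            simp only [List.foldl_cons]
            rw [show ((l:Int)+1) - (l+1) = 0 by omega, show max (0:Int) 0 = 0 by omega]
            have hs := maxfold_shift tail l 0
            norm_num at hs
            rw [maxfold_init, show ((l:Int)+1) - l = 1 by omega, hs]
            omega
          rw [hmax]
          exact ihc (fun x hx => hcs x (List.mem_cons_of_mem _ hx)) _ _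
            (by rw [(vs_mono adj a c (l+1) w).1]; exact hwl)
            (lt_of_le_of_lt (vs_mono adj a c (l+1) w).2 hwc)
    have hstart : (0 : Int) = ([(n,l)] : List (Int × Int)).foldl (fun m p => max m (p.2 - l)) 0 := by
      simp
    simp only [dfsMax, visitSeq]
    rw [show ((0 : Int), PySem.List.pySetD vis (n-1) 1)
          = (([(n,l)] : List (Int × Int)).foldl (fun m p => max m (p.2 - l)) 0,
             PySem.List.pySetD vis (n-1) 1) by rw [← hstart]]
    rw [fold (adj.getD n []) (fun c hc => hg n c hc) [(n,l)] (PySem.List.pySetD vis (n-1) 1)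
          (by rw [hl1]; exact hlen) (by omega)]
    rw [fold_acc adj a l (adj.getD n []) [(n,l)] (PySem.List.pySetD vis (n-1) 1)]
    simp

-- ---------- dfs (fill) over the visit sequence ----------

theorem dfsFill_eq (adj : PySem.Dict Int (List Int)) (A : Int) (Dv : List Int)
    (hg : adjGood adj A) :
    ∀ (k : Nat) (vis : List Int), vis.count 0 ≤ k →
    ∀ (n l : Int) (f : Nat) (lv : PySem.Dict Int (List Int)),
      vis.length = A.toNat → 1 ≤ n → n ≤ A →
      PySem.List.pyGetD vis (n-1) 0 = 0 → vis.count 0 < f →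
      dfsFill adj Dv f n l (lv, vis)
        = ((visitSeq adj f n l vis).1.foldl
              (fun d p => d.modify p.2 [] (· ++ [PySem.List.pyGetD Dv (p.1-1) 0])) lv,
           (visitSeq adj f n l vis).2) := by
  intro k
  induction k using Nat.strong_induction_on with
  | _ k ih =>
    intro vis hk n l f lv hlen hn1 hnA h0 hf
    obtain ⟨a, rfl⟩ : ∃ a, f = a + 1 := ⟨f-1, by omega⟩
    have hidx : (n-1).toNat < vis.length := by omega
    have hzero := zero_mem_of_pyGetD vis n hn1 (by omega) h0
    have hc1 : (PySem.List.pySetD vis (n-1) 1).count 0 + 1 = vis.count 0 := by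
      rw [PySem.List.pySetD_of_nonneg vis 1 (by omega)]
      exact count_set_zero vis _ hidx hzero
    have hl1 : (PySem.List.pySetD vis (n-1) 1).length = vis.length :=
      PySem.List.length_pySetD _ _ _
    have fold : ∀ (cs : List Int), (∀ c ∈ cs, 1 ≤ c ∧ c ≤ A) →
        ∀ (sq : List (Int × Int)) (w : List Int),
        w.length = A.toNat → w.count 0 < vis.count 0 →
        cs.foldl (fun t i =>
            if PySem.List.pyGetD t.2 (i-1) 0 ≠ 0 then t
            else dfsFill adj Dv a i (l+1) t)
          (sq.foldl (fun d p => d.modify p.2 [] (· ++ [PySem.List.pyGetD Dv (p.1-1) 0])) lv, w)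
        = ((cs.foldl (fun acc i =>
            if PySem.List.pyGetD acc.2 (i-1) 0 ≠ 0 then acc
            else
              let s := visitSeq adj a i (l+1) acc.2
              (acc.1 ++ s.1, s.2)) (sq, w)).1.foldl
              (fun d p => d.modify p.2 [] (· ++ [PySem.List.pyGetD Dv (p.1-1) 0])) lv,
           (cs.foldl (fun acc i =>
            if PySem.List.pyGetD acc.2 (i-1) 0 ≠ 0 then acc
            else
              let s := visitSeq adj a i (l+1) acc.2
              (acc.1 ++ s.1, s.2)) (sq, w)).2) := by
      intro cs
      induction cs with
      | nil => intro _ sq w _ _; rfl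
      | cons c cs ihc =>
        intro hcs sq w hwl hwc
        simp only [List.foldl_cons]
        by_cases hgd : PySem.List.pyGetD w (c-1) 0 ≠ 0
        · rw [if_pos hgd, if_pos hgd]
          exact ihc (fun x hx => hcs x (List.mem_cons_of_mem _ hx)) sq w hwl hwc
        · rw [if_neg hgd, if_neg hgd]
          have hgd0 : PySem.List.pyGetD w (c-1) 0 = 0 := not_not.mp hgd
          obtain ⟨hc1', hcA'⟩ := hcs c (List.mem_cons_self ..)
          have hrec := ih (w.count 0) (by omega) w le_rfl c (l+1) a
            (sq.foldl (fun d p => d.modify p.2 [] (· ++ [PySem.List.pyGetD Dv (p.1-1) 0])) lv)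
            hwl hc1' hcA' hgd0 (by omega)
          rw [hrec, ← List.foldl_append]
          exact ihc (fun x hx => hcs x (List.mem_cons_of_mem _ hx)) _ _
            (by rw [(vs_mono adj a c (l+1) w).1]; exact hwl)
            (lt_of_le_of_lt (vs_mono adj a c (l+1) w).2 hwc)
    simp only [dfsFill, visitSeq]
    rw [show (lv.modify l [] (· ++ [PySem.List.pyGetD Dv (n-1) 0]), PySem.List.pySetD vis (n-1) 1)
          = (([(n,l)] : List (Int × Int)).foldl
              (fun d p => d.modify p.2 [] (· ++ [PySem.List.pyGetD Dv (p.1-1) 0])) lv,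
             PySem.List.pySetD vis (n-1) 1) by simp]
    rw [fold (adj.getD n []) (fun c hc => hg n c hc) [(n,l)] (PySem.List.pySetD vis (n-1) 1)
          (by rw [hl1]; exact hlen) (by omega)]
    rw [fold_acc adj a l (adj.getD n []) [(n,l)] (PySem.List.pySetD vis (n-1) 1)]
    simp


-- ---------- the adjacency dict only holds valid node numbers ----------

theorem zip_take {α β : Type} : ∀ (xs : List α) (ys : List β),
    xs.zip ys = xs.zip (ys.take xs.length) := by
  intro xs
  induction xs with
  | nil => intro ys; simp
  | cons x xs ih =>
    intro ys
    cases ys with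
    | nil => simp
    | cons y ys =>
      simp only [List.zip_cons_cons, List.length_cons, List.take_succ_cons]
      rw [← ih]

theorem insert_range_keeps (A : Int) :
    ∀ (rng : List Int) (d : PySem.Dict Int (List Int)),
      (∀ n : Int, ∀ x ∈ d.getD n [], 1 ≤ x ∧ x ≤ A) →
      ∀ n : Int, ∀ x ∈ (rng.foldl (fun d i => d.insert i ([] : List Int)) d).getD n [],
        1 ≤ x ∧ x ≤ A := by
  intro rng
  induction rng with
  | nil => intro d hd; exact hd
  | cons i rng ih =>
    intro d hd
    refine ih _ ?_
    intro n x hx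
    rw [PySem.Dict.getD_insert] at hx
    by_cases hni : n = i
    · rw [if_pos hni] at hx; simp at hx
    · rw [if_neg hni] at hx; exact hd n x hx

theorem modify_append_keeps (A : Int) (d : PySem.Dict Int (List Int)) (u v : Int)
    (hd : ∀ n : Int, ∀ x ∈ d.getD n [], 1 ≤ x ∧ x ≤ A) (hv : 1 ≤ v ∧ v ≤ A) :
    ∀ n : Int, ∀ x ∈ (d.modify u [] (· ++ [v])).getD n [], 1 ≤ x ∧ x ≤ A := by
  intro n x hx
  rw [PySem.Dict.getD_modify] at hx
  by_cases hnu : n = u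
  · rw [if_pos hnu] at hx
    rcases List.mem_append.mp hx with h | h
    · exact hd u x h
    · simp at h; subst h; exact hv
  · rw [if_neg hnu] at hx; exact hd n x hx

theorem buildAdj_good (A : Int) (B C : List Int)
    (hB : ∀ x ∈ B, 1 ≤ x ∧ x ≤ A) (hC : ∀ x ∈ C.take B.length, 1 ≤ x ∧ x ≤ A) :
    adjGood (buildAdj A B C) A := by
  have hzip : ∀ p ∈ B.zip C, (1 ≤ p.1 ∧ p.1 ≤ A) ∧ (1 ≤ p.2 ∧ p.2 ≤ A) := by
    intro p hp
    rw [zip_take B C] at hp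
    obtain ⟨h1, h2⟩ := List.of_mem_zip (a := p.1) (b := p.2) (by simpa using hp)
    exact ⟨hB _ h1, hC _ h2⟩
  unfold adjGood buildAdj
  have main : ∀ (l : List (Int × Int)), (∀ p ∈ l, (1 ≤ p.1 ∧ p.1 ≤ A) ∧ (1 ≤ p.2 ∧ p.2 ≤ A)) →
      ∀ (d : PySem.Dict Int (List Int)), (∀ n : Int, ∀ x ∈ d.getD n [], 1 ≤ x ∧ x ≤ A) →
      ∀ n : Int, ∀ x ∈ (l.foldl
        (fun d uv => (d.modify uv.1 [] (· ++ [uv.2])).modify uv.2 [] (· ++ [uv.1])) d).getD n [],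
        1 ≤ x ∧ x ≤ A := by
    intro l
    induction l with
    | nil => intro _ d hd; exact hd
    | cons p l ih =>
      intro hl d hd
      obtain ⟨hp1, hp2⟩ := hl p (List.mem_cons_self ..)
      refine ih (fun q hq => hl q (List.mem_cons_of_mem _ hq)) _ ?_
      exact modify_append_keeps A _ p.2 p.1
        (modify_append_keeps A d p.1 p.2 hd hp2) hp1
  exact main (B.zip C) hzip _
    (insert_range_keeps A _ PySem.Dict.empty (by intro n x hx; rw [PySem.Dict.getD_empty] at hx; simp at hx))

-- ---------- the pre-seeded level dict reads as [] everywhere ----------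

theorem foldl_insert_nil_getD (rng : List Int) :
    ∀ (d : PySem.Dict Int (List Int)), (∀ L : Int, d.getD L [] = []) →
    ∀ L : Int, (rng.foldl (fun d i => d.insert i ([] : List Int)) d).getD L [] = [] := by
  induction rng with
  | nil => intro d hd; exact hd
  | cons i rng ih =>
    intro d hd
    refine ih _ ?_
    intro L
    rw [PySem.Dict.getD_insert]
    by_cases hLi : L = i
    · rw [if_pos hLi]
    · rw [if_neg hLi]; exact hd L

-- ---------- sorting every value of a dict, read through getD ----------

theorem get?_mapVals (f : List Int → List Int) :
    ∀ (its : List (Int × List Int)) (k : Int),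
      (PySem.Dict.mk (its.map (fun p => (p.1, f p.2)))).get? k
        = ((PySem.Dict.mk its).get? k).map f := by
  intro its
  induction its with
  | nil => intro k; rfl
  | cons p its ih =>
    intro k
    obtain ⟨a, b⟩ := p
    simp only [List.map_cons]
    rw [PySem.Dict.get?_mk_cons, PySem.Dict.get?_mk_cons]
    by_cases hak : a == k
    · rw [if_pos hak, if_pos hak]; rfl
    · rw [if_neg hak, if_neg hak]; exact ih k

theorem getD_mapVals_sorted (lv : PySem.Dict Int (List Int)) (k : Int) :
    (PySem.Dict.mk (lv.items.map (fun p => (p.1, PySem.List.sorted p.2 (fun v => v))))).getD k []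
      = PySem.List.sorted (lv.getD k []) (fun v => v) := by
  have h := get?_mapVals (fun t => PySem.List.sorted t (fun v => v)) lv.items k
  rw [PySem.Dict.getD_eq_get?_getD, PySem.Dict.getD_eq_get?_getD]
  rw [show (PySem.Dict.mk lv.items) = lv from rfl] at h
  rw [h]
  cases lv.get? k with
  | none => rfl
  | some t => rfl

-- ---------- splitting the query filter ----------

theorem filter_and_map (s : List (Int × Int)) (L X : Int) :
    (s.filter (fun p => p.1 == L && decide (X ≤ p.2))).map (fun p => p.2)
      = ((s.filter (fun p => p.1 == L)).map (fun p => p.2)).filter (fun v => decide (X ≤ v)) := by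
  induction s with
  | nil => rfl
  | cons p t ih =>
    by_cases h1 : p.1 = L <;> by_cases h2 : X ≤ p.2 <;>
      simp [h1, h2, ih]


-- ---------- the hand-written binary search is the sorted lower bound ----------

theorem dropWhile_eq_drop (p : Int → Bool) :
    ∀ (s : List Int) (k : Nat), k ≤ s.length →
      (∀ (i : Nat) (h : i < s.length), i < k → p s[i]) →
      (∀ h : k < s.length, ¬ p s[k]) →
      s.dropWhile p = s.drop k := by
  intro s
  induction s with
  | nil => intro k h _ _; simp
  | cons a t ih =>
    intro k hk hpre hstop
    cases k with
    | zero =>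
      have := hstop (by simp)
      simp only [List.getElem_cons_zero] at this
      simp [this]
    | succ k =>
      have ha : p a := by simpa using hpre 0 (by simp) (by omega)
      simp only [List.dropWhile_cons, ha, if_pos, List.drop_succ_cons]
      exact ih k (by simpa using hk)
        (fun i h hik => by simpa using hpre (i+1) (by simpa) (by omega))
        (fun h => by simpa using hstop (by simpa using h))

theorem binGo (s : List Int) (hs : s.Pairwise (· ≤ ·)) (X : Int) :
    ∀ (fuel : Nat) (st en ans : Int),
      0 ≤ st → st ≤ en + 1 → en < (s.length : Int) →
      (en + 1 - st).toNat < fuel →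
      (∀ (i : Nat), (i : Int) < st → ∀ h : i < s.length, s[i] < X) →
      ((en + 1 = (s.length : Int) ∧ ans = -1) ∨
        (en + 1 < (s.length : Int) ∧ ans = s.getD (en+1).toNat 0 ∧ X ≤ ans)) →
      binSearchGo s X fuel st en ans
        = (s.dropWhile (fun v => decide (v < X))).head?.getD (-1) := by
  intro fuel
  induction fuel with
  | zero => intro st en ans _ _ _ hlt _ _; omega
  | succ fuel ih =>
    intro st en ans h0 hse hen hfuel hpre hans
    simp only [binSearchGo]
    by_cases hcmp : st ≤ en
    · rw [if_pos hcmp]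
      obtain ⟨hm1, hm2⟩ := PySem.Int.floordiv_two_mid_bounds hcmp
      have hmidlen : PySem.Int.floordiv (st + en) 2 < (s.length : Int) := by omega
      have hget : PySem.List.pyGetD s (PySem.Int.floordiv (st + en) 2) 0
          = s.getD (PySem.Int.floordiv (st + en) 2).toNat 0 := by
        rw [PySem.List.pyGetD_eq_getElem s 0 (by omega) (by omega),
            List.getD_eq_getElem _ _ (by omega)]
      by_cases hv : PySem.List.pyGetD s (PySem.Int.floordiv (st + en) 2) 0 ≥ X
      · rw [if_pos hv]
        refine ih st (PySem.Int.floordiv (st + en) 2 - 1) _ h0 (by omega) (by omega) (by omega)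
          hpre ?_
        right
        refine ⟨by omega, ?_, ?_⟩
        · rw [show PySem.Int.floordiv (st + en) 2 - 1 + 1 = PySem.Int.floordiv (st + en) 2 by omega]
          exact hget
        · exact hget ▸ hv
      · rw [if_neg hv]
        refine ih (PySem.Int.floordiv (st + en) 2 + 1) en ans (by omega) (by omega) hen (by omega)
          ?_ hans
        intro i hi h
        have hle : s[i] ≤ s[(PySem.Int.floordiv (st + en) 2).toNat]'(by omega) := by
          rcases lt_or_eq_of_le (show i ≤ (PySem.Int.floordiv (st + en) 2).toNat by omega) with hlt | heq
          · exact List.pairwise_iff_getElem.mp hs i _ h (by omega) hlt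
          · have e1 : s[i] = s.getD i 0 := (List.getD_eq_getElem s 0 h).symm
            have e2 : s[(PySem.Int.floordiv (st + en) 2).toNat]'(by omega)
                = s.getD (PySem.Int.floordiv (st + en) 2).toNat 0 :=
              (List.getD_eq_getElem s 0 (by omega)).symm
            rw [e1, e2, heq]
        have hmidv : s[(PySem.Int.floordiv (st + en) 2).toNat]'(by omega) < X := by
          rw [hget, List.getD_eq_getElem _ _ (by omega)] at hv
          omega
        omega
    · rw [if_neg hcmp]
      have hst : st = en + 1 := by omega
      rcases hans with ⟨hlen, hansv⟩ | ⟨hlt, hansv, hX⟩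
      · have : s.dropWhile (fun v => decide (v < X)) = [] := by
          rw [List.dropWhile_eq_nil_iff]
          intro x hx
          obtain ⟨i, hi, rfl⟩ := List.mem_iff_getElem.mp hx
          simpa using hpre i (by omega) hi
        rw [this, hansv]; rfl
      · have hdrop : s.dropWhile (fun v => decide (v < X)) = s.drop st.toNat := by
          refine dropWhile_eq_drop _ s st.toNat (by omega) ?_ ?_
          · intro i h hik
            simpa using hpre i (by omega) h
          · intro h
            simp only [decide_eq_true_eq, not_lt]
            have hix : st.toNat = (en + 1).toNat := by omega
            rw [List.getD_eq_getElem _ _ (by omega)] at hansv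
            calc X ≤ ans := hX
              _ = _ := by rw [hansv]; congr 1; omega
        have hix : (en + 1).toNat = st.toNat := by omega
        rw [hdrop, List.head?_drop, List.getElem?_eq_getElem (by omega), hansv, hix,
            List.getD_eq_getElem _ _ (by omega)]
        rfl

theorem dropWhile_sorted_filter (X : Int) :
    ∀ (s : List Int), s.Pairwise (· ≤ ·) →
      s.dropWhile (fun v => decide (v < X)) = s.filter (fun v => decide (X ≤ v)) := by
  intro s
  induction s with
  | nil => intro _; rfl
  | cons a t ih =>
    intro hp
    rw [List.pairwise_cons] at hp
    by_cases ha : a < X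
    · simp [ha, ih hp.2, show ¬ X ≤ a by omega]
    · have hXa : X ≤ a := by omega
      simp only [List.dropWhile_cons, decide_eq_true_eq, if_neg ha]
      rw [List.filter_cons_of_pos (by simpa using hXa)]
      have ht : t.filter (fun v => decide (X ≤ v)) = t :=
        List.filter_eq_self.mpr (fun b hb => by simpa using le_trans hXa (hp.1 b hb))
      rw [ht]

theorem min?_of_ne_nil {α κ : Type} [LT κ] [DecidableLT κ] (key : α → κ) :
    ∀ (xs : List α), xs ≠ [] → ∃ m, PySem.List.min? xs key = some m := by
  have step : ∀ (l : List α) (o : α),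
      ∃ m, l.foldl (fun acc x =>
        match acc with
        | none => some x
        | some m => if key x < key m then some x else some m) (some o) = some m := by
    intro l
    induction l with
    | nil => intro o; exact ⟨o, rfl⟩
    | cons x l ih =>
      intro o
      simp only [List.foldl_cons]
      by_cases hx : key x < key o
      · rw [if_pos hx]; exact ih x
      · rw [if_neg hx]; exact ih o
  intro xs hxs
  cases xs with
  | nil => exact absurd rfl hxs
  | cons x xs =>
    unfold PySem.List.min?
    simp only [List.foldl_cons]
    exact step xs x

theorem lowerBound_eq_min (w : List Int) (X : Int) :
    binSearchGo (PySem.List.sorted w (fun v => v)) X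
        ((PySem.List.sorted w (fun v => v)).length + 1) 0
        (((PySem.List.sorted w (fun v => v)).length : Int) - 1) (-1)
      = PySem.List.minD (w.filter (fun v => decide (X ≤ v))) (fun v => v) (-1) := by
  have hp : (PySem.List.sorted w (fun v => v)).Pairwise (· ≤ ·) := by
    simpa using PySem.List.sorted_pairwise w (fun v => v)
  have h1 := binGo (PySem.List.sorted w (fun v => v)) hp X
    ((PySem.List.sorted w (fun v => v)).length + 1) 0
    (((PySem.List.sorted w (fun v => v)).length : Int) - 1) (-1)
    le_rfl (by omega) (by omega) (by omega)
    (by intro i hi _; omega)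
    (by left; exact ⟨by omega, rfl⟩)
  rw [h1, dropWhile_sorted_filter X _ hp]
  have hperm : ((PySem.List.sorted w (fun v => v)).filter (fun v => decide (X ≤ v))).Perm
      (w.filter (fun v => decide (X ≤ v))) :=
    (PySem.List.sorted_perm w (fun v => v) false).filter _
  cases hw : w.filter (fun v => decide (X ≤ v)) with
  | nil =>
    rw [hw] at hperm
    rw [List.Perm.eq_nil hperm]
    rfl
  | cons h0 t0 =>
    have hsf : (PySem.List.sorted w (fun v => v)).filter (fun v => decide (X ≤ v)) ≠ [] := by
      intro hnil
      rw [hnil, hw] at hperm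
      exact absurd (List.Perm.length_eq hperm) (by simp)
    obtain ⟨hh, tt, hcons⟩ : ∃ hh tt,
        (PySem.List.sorted w (fun v => v)).filter (fun v => decide (X ≤ v)) = hh :: tt := by
      cases hsf' : (PySem.List.sorted w (fun v => v)).filter (fun v => decide (X ≤ v)) with
      | nil => exact absurd hsf' hsf
      | cons a b => exact ⟨a, b, rfl⟩
    obtain ⟨m, hm⟩ := min?_of_ne_nil (fun v => v) (w.filter (fun v => decide (X ≤ v))) (by rw [hw]; simp)
    have hmmem : m ∈ (PySem.List.sorted w (fun v => v)).filter (fun v => decide (X ≤ v)) :=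
      hperm.mem_iff.mpr (PySem.List.min?_mem hm)
    have hpf : ((PySem.List.sorted w (fun v => v)).filter (fun v => decide (X ≤ v))).Pairwise (· ≤ ·) :=
      hp.filter _
    have hhm : hh ≤ m := by
      rw [hcons] at hmmem hpf
      rw [List.pairwise_cons] at hpf
      rcases List.mem_cons.mp hmmem with rfl | hmem
      · exact le_refl _
      · exact hpf.1 m hmem
    have hmh : m ≤ hh := by
      have : hh ∈ w.filter (fun v => decide (X ≤ v)) := by
        refine hperm.mem_iff.mp ?_
        rw [hcons]; exact List.mem_cons_self ..
      simpa using PySem.List.min?_isMin hm hh this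
    rw [hw] at hm
    rw [hcons]
    unfold PySem.List.minD
    rw [hm]
    simp [le_antisymm hhm hmh]


-- ---------- "if p.2 > m then p.2 else m" is the running max of levels ----------

theorem ifmax_fold (t : List (Int × Int)) :
    ∀ (m : Int), t.foldl (fun m p => if p.2 > m then p.2 else m) m
      = t.foldl (fun m p => max m (p.2 - 0)) m := by
  induction t with
  | nil => intro m; rfl
  | cons p t ih =>
    intro m
    simp only [List.foldl_cons]
    rw [show (if p.2 > m then p.2 else m) = max m (p.2 - 0) by omega, ih]

-- ===== VERDICT (by name: the statement is the Claim_ definition above) =====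
theorem solve_spec : Claim_equal_solve := by
  unfold Claim_equal_solve
  intro A B C D E F _ hpre
  obtain ⟨hA, hBC, hEF, hB, hC, _⟩ := hpre
  have hg : adjGood (buildAdj A B C) A := buildAdj_good A B C hB hC
  have hlen0 : (List.replicate A.toNat (0:Int)).length = A.toNat := by simp
  have hcnt0 : (List.replicate A.toNat (0:Int)).count 0 = A.toNat := by
    simp
  have hget0 : PySem.List.pyGetD (List.replicate A.toNat (0:Int)) (1-1) 0 = 0 := by
    rw [show (1:Int)-1 = 0 by omega,
        PySem.List.pyGetD_eq_getElem _ 0 (by omega) (by simp; omega)]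
    simp
  -- the common DFS visit sequence
  have hdm := dfsMax_eq (buildAdj A B C) A hg A.toNat (List.replicate A.toNat 0) (by omega)
    1 0 (A.toNat+1) hlen0 le_rfl hA hget0 (by omega)
  have hbr := bridge (buildAdj A B C) A D hg A.toNat (List.replicate A.toNat 0) (by omega)
    [(1,0)]
    (by intro p hp; simp at hp; rw [hp]; exact ⟨le_rfl, hA⟩)
    hlen0 [] 0 (A.toNat+1) (by omega)
  have hrs : runSpec (buildAdj A B C) D [(1,0)] (List.replicate A.toNat 0) [] 0
      = ((visitSeq (buildAdj A B C) (A.toNat+1) 1 0 (List.replicate A.toNat 0)).1.map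
           (fun p => (p.2, PySem.List.pyGetD D (p.1-1) 0)),
         (visitSeq (buildAdj A B C) (A.toNat+1) 1 0 (List.replicate A.toNat 0)).1.foldl
           (fun m p => if p.2 > m then p.2 else m) 0) := by
    simp only [runSpec]
    rw [if_neg (by rw [hget0]; exact not_not.mpr rfl), hlen0]
    simp only [List.nil_append]
  rw [hrs] at hbr
  unfold Spec_solve solve solve_alt
  dsimp only
  rw [hdm, hbr]
  simp only []
  rw [show (visitSeq (buildAdj A B C) (A.toNat+1) 1 0 (List.replicate A.toNat 0)).1.foldl
        (fun m p => if p.2 > m then p.2 else m) 0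
      = (visitSeq (buildAdj A B C) (A.toNat+1) 1 0 (List.replicate A.toNat 0)).1.foldl
        (fun m p => max m (p.2 - 0)) 0 from ifmax_fold _ 0]
  have hdf := dfsFill_eq (buildAdj A B C) A D hg A.toNat (List.replicate A.toNat 0) (by omega)
    1 0 (A.toNat+1)
    ((PySem.List.pyRange 0
        ((visitSeq (buildAdj A B C) (A.toNat+1) 1 0 (List.replicate A.toNat 0)).1.foldl
          (fun m p => max m (p.2 - 0)) 0 + 1) 1).foldl
      (fun d i => d.insert i ([] : List Int)) PySem.Dict.empty)
    hlen0 le_rfl hA hget0 (by omega)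
  rw [hdf]
  -- per-level unsorted lists, read off the filled dict
  have harr : ∀ L : Int,
      ((visitSeq (buildAdj A B C) (A.toNat+1) 1 0 (List.replicate A.toNat 0)).1.foldl
        (fun d p => d.modify p.2 [] (· ++ [PySem.List.pyGetD D (p.1-1) 0]))
        ((PySem.List.pyRange 0
            ((visitSeq (buildAdj A B C) (A.toNat+1) 1 0 (List.replicate A.toNat 0)).1.foldl
              (fun m p => max m (p.2 - 0)) 0 + 1) 1).foldl
          (fun d i => d.insert i ([] : List Int)) PySem.Dict.empty)).getD L []
      = (((visitSeq (buildAdj A B C) (A.toNat+1) 1 0 (List.replicate A.toNat 0)).1.map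
            (fun p => (p.2, PySem.List.pyGetD D (p.1-1) 0))).filter
          (fun p => p.1 == L)).map (fun p => p.2) := by
    intro L
    have h := PySem.Dict.getD_foldl_modify_append
      ((visitSeq (buildAdj A B C) (A.toNat+1) 1 0 (List.replicate A.toNat 0)).1.map
        (fun p => (p.2, PySem.List.pyGetD D (p.1-1) 0)))
      ((PySem.List.pyRange 0
          ((visitSeq (buildAdj A B C) (A.toNat+1) 1 0 (List.replicate A.toNat 0)).1.foldl
            (fun m p => max m (p.2 - 0)) 0 + 1) 1).foldl
        (fun d i => d.insert i ([] : List Int)) PySem.Dict.empty) L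
    rw [List.foldl_map] at h
    rw [h, foldl_insert_nil_getD _ _ (fun L => PySem.Dict.getD_empty L []) L]
    simp
  -- compare the two query loops
  rw [PySem.List.foldl_append_singleton_eq_map, PySem.List.foldl_append_singleton_eq_map]
  simp only [List.nil_append]
  refine List.map_congr_left ?_
  intro q _
  rw [getD_mapVals_sorted, harr]
  rw [filter_and_map]
  exact lowerBound_eq_min _ q.2
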